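-- pv_equiv track=rewrite | github.com/nbannayi/AoC2023 | Day22/SandSlabs.py | can_drop
-- ===== SOURCE A (Python) =====
-- def get_slab_blocks(slab):
--     '''Explode a slab into constituent blocks.'''
--     end_1, end_2 = slab[0], slab[1]
--     if end_1[0] != end_2[0]:
--         blocks = [[n, end_1[1], end_1[2]] for n in range(end_1[0], end_2[0]+1)]
--     elif end_1[1] != end_2[1]:
--         blocks = [[end_1[0], n, end_1[2]] for n in range(end_1[1], end_2[1]+1)]
--     else:
--         blocks = [[end_1[0], end_1[1], n] for n in range(end_1[2], end_2[2]+1)]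
--     return blocks
--
-- def can_drop(slab, grid):
--     '''Returns true if the slab can drop.'''
--     blocks = get_slab_blocks(slab)
--     # Get all blocks at the lowest level.
--     min_z = sorted(blocks, key=lambda x: x[2])[0][2]
--     lowest_blocks = [sublist for sublist in blocks if sublist[2] == min_z]
--     # Check if all blocks can move down 1 block.
--     can_drop = True
--     solid_count = 0
--     for block in lowest_blocks:
--         x,y,z = block
--         if z-1 == 0:
--             can_drop = False
--             break
--         else:
--             solid_count += grid[x][y][z-1]
--     if solid_count > 0:
--         can_drop = False
--     return can_drop
-- ===== SOURCE B (Python) =====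
-- def can_drop(slab, grid):
--     '''Returns true if the slab can drop.'''
--     e1, e2 = slab[0], slab[1]
--     if e1[0] != e2[0]:
--         min_z = e1[2]
--         cells = [(n, e1[1]) for n in range(e1[0], e2[0] + 1)]
--     elif e1[1] != e2[1]:
--         min_z = e1[2]
--         cells = [(e1[0], n) for n in range(e1[1], e2[1] + 1)]
--     else:
--         min_z = min(e1[2], e2[2])
--         cells = [(e1[0], e1[1])]
--     if min_z == 1:
--         return False
--     return sum(grid[x][y][min_z - 1] for x, y in cells) <= 0
-- ===== Notes on version B (the rewrite author's own statement) =====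
-- stated objective: simpler
-- what changed: B never explodes the slab into 3D blocks: it decides the orientation once, names the slab's lowest layer in closed form (a single cell or one horizontal line of (x,y) cells), and returns from one sum over that layer, dropping get_slab_blocks, the sort-to-find-min and the filter pass entirely.
-- outside the precondition, e.g. on can_drop([[2, 0, 3], [0, 0, 3]], [[[0, 0, 0, 0]]]): A raises IndexError, B returns True
import Mathlib
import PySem

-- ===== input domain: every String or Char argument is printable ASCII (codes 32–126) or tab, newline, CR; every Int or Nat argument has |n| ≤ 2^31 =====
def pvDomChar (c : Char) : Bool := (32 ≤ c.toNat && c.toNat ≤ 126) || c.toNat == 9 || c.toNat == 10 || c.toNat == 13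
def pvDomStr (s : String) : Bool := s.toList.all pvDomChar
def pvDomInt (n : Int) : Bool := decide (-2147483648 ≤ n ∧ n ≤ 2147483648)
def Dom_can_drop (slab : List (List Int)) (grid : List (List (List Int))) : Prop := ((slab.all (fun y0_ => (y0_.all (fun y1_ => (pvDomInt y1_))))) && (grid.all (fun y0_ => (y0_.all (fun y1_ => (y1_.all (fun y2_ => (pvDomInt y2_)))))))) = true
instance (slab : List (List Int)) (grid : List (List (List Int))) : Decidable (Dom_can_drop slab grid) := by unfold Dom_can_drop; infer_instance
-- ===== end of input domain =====

-- B drops the block explosion: it decides the slab's orientation once, names the lowest layer in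
-- closed form (one cell, or one line of (x,y) cells) and returns from a single sum over it —
-- no get_slab_blocks, no sort, no filter. Objective: simpler.

-- ===== PORT A =====
def get_slab_blocks (slab : List (List Int)) : List (List Int) :=
  let end1 := PySem.List.pyGetD slab 0 []
  let end2 := PySem.List.pyGetD slab 1 []
  if PySem.List.pyGetD end1 0 0 ≠ PySem.List.pyGetD end2 0 0 then
    (PySem.List.pyRange (PySem.List.pyGetD end1 0 0) (PySem.List.pyGetD end2 0 0 + 1) 1).map
      (fun n => [n, PySem.List.pyGetD end1 1 0, PySem.List.pyGetD end1 2 0])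
  else if PySem.List.pyGetD end1 1 0 ≠ PySem.List.pyGetD end2 1 0 then
    (PySem.List.pyRange (PySem.List.pyGetD end1 1 0) (PySem.List.pyGetD end2 1 0 + 1) 1).map
      (fun n => [PySem.List.pyGetD end1 0 0, n, PySem.List.pyGetD end1 2 0])
  else
    (PySem.List.pyRange (PySem.List.pyGetD end1 2 0) (PySem.List.pyGetD end2 2 0 + 1) 1).map
      (fun n => [PySem.List.pyGetD end1 0 0, PySem.List.pyGetD end1 1 0, n])

-- A's 'for block in lowest_blocks' loop with its break, on the (can_drop, solid_count) state.
def can_drop_loop (grid : List (List (List Int))) : List (List Int) → Bool → Int → Bool × Int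
  | [], cd, sc => (cd, sc)
  | b :: rest, cd, sc =>
    let x := PySem.List.pyGetD b 0 0
    let y := PySem.List.pyGetD b 1 0
    let z := PySem.List.pyGetD b 2 0
    if z - 1 = 0 then (false, sc)
    else can_drop_loop grid rest cd
      (sc + PySem.List.pyGetD (PySem.List.pyGetD (PySem.List.pyGetD grid x []) y []) (z - 1) 0)

def can_drop (slab : List (List Int)) (grid : List (List (List Int))) : Bool :=
  let blocks := get_slab_blocks slab
  let min_z := PySem.List.pyGetD
      (PySem.List.pyGetD (PySem.List.sorted blocks (fun x => PySem.List.pyGetD x 2 0)) 0 []) 2 0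
  let lowest := blocks.filter (fun b => PySem.List.pyGetD b 2 0 == min_z)
  let r := can_drop_loop grid lowest true 0
  if r.2 > 0 then false else r.1

-- ===== PORT B =====
def can_drop_alt (slab : List (List Int)) (grid : List (List (List Int))) : Bool :=
  let e1 := PySem.List.pyGetD slab 0 []
  let e2 := PySem.List.pyGetD slab 1 []
  let p :=
    if PySem.List.pyGetD e1 0 0 ≠ PySem.List.pyGetD e2 0 0 then
      (PySem.List.pyGetD e1 2 0,
       (PySem.List.pyRange (PySem.List.pyGetD e1 0 0) (PySem.List.pyGetD e2 0 0 + 1) 1).map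
         (fun n => (n, PySem.List.pyGetD e1 1 0)))
    else if PySem.List.pyGetD e1 1 0 ≠ PySem.List.pyGetD e2 1 0 then
      (PySem.List.pyGetD e1 2 0,
       (PySem.List.pyRange (PySem.List.pyGetD e1 1 0) (PySem.List.pyGetD e2 1 0 + 1) 1).map
         (fun n => (PySem.List.pyGetD e1 0 0, n)))
    else
      (min (PySem.List.pyGetD e1 2 0) (PySem.List.pyGetD e2 2 0),
       [(PySem.List.pyGetD e1 0 0, PySem.List.pyGetD e1 1 0)])
  if p.1 = 1 then false
  else decide ((p.2.map (fun c =>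
    PySem.List.pyGetD (PySem.List.pyGetD (PySem.List.pyGetD grid c.1 []) c.2 []) (p.1 - 1) 0)).sum ≤ 0)

-- ===== PRECONDITION & SPEC =====
-- a grid cell (x, y, zi) that Python can index without an IndexError (negative wraparound allowed)
def pvCellOK (grid : List (List (List Int))) (x y zi : Int) : Prop :=
  PySem.Raise.InRange grid.length x ∧
  PySem.Raise.InRange (PySem.List.pyGetD grid x []).length y ∧
  PySem.Raise.InRange (PySem.List.pyGetD (PySem.List.pyGetD grid x []) y []).length zi

-- Pre_ excludes exactly the inputs on which A raises: slabs without two 3-coordinate endpoints,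
-- descending endpoints (empty range, so sorted(blocks)[0] raises IndexError), and out-of-range
-- grid lookups on the lowest layer.
def Pre_can_drop (slab : List (List Int)) (grid : List (List (List Int))) : Prop :=
  2 ≤ slab.length ∧
  (let e1 := PySem.List.pyGetD slab 0 []
   let e2 := PySem.List.pyGetD slab 1 []
   3 ≤ e1.length ∧ 3 ≤ e2.length ∧
   (let x1 := PySem.List.pyGetD e1 0 0; let y1 := PySem.List.pyGetD e1 1 0; let z1 := PySem.List.pyGetD e1 2 0
    let x2 := PySem.List.pyGetD e2 0 0; let y2 := PySem.List.pyGetD e2 1 0; let z2 := PySem.List.pyGetD e2 2 0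
    if x1 ≠ x2 then
      x1 ≤ x2 ∧ (z1 = 1 ∨ ∀ n ∈ PySem.List.pyRange x1 (x2 + 1) 1, pvCellOK grid n y1 (z1 - 1))
    else if y1 ≠ y2 then
      y1 ≤ y2 ∧ (z1 = 1 ∨ ∀ n ∈ PySem.List.pyRange y1 (y2 + 1) 1, pvCellOK grid x1 n (z1 - 1))
    else
      z1 ≤ z2 ∧ (z1 = 1 ∨ pvCellOK grid x1 y1 (z1 - 1))))

instance (slab : List (List Int)) (grid : List (List (List Int))) : Decidable (Pre_can_drop slab grid) := by
  unfold Pre_can_drop pvCellOK; infer_instance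

def pvWitness_can_drop : List (List Int) × List (List (List Int)) :=
  ([[0, 0, 2], [0, 0, 2]], [[[1, 0]]])

def Spec_can_drop (slab : List (List Int)) (grid : List (List (List Int))) (out : Bool) : Prop := out = can_drop_alt slab grid
instance (slab : List (List Int)) (grid : List (List (List Int))) (out : Bool) : Decidable (Spec_can_drop slab grid out) := by unfold Spec_can_drop; infer_instance

-- ===== CLAIM (what is proved, stated in full; the proofs are below) =====
def Claim_equal_can_drop : Prop := ∀ (slab : List (List Int)) (grid : List (List (List Int))), Dom_can_drop slab grid → Pre_can_drop slab grid → Spec_can_drop slab grid (can_drop slab grid)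

-- ===== LEMMAS AND PROOFS =====

-- pyGetD on the literal 3-lists the ports build
theorem pvGet0 (a b c : Int) : PySem.List.pyGetD [a, b, c] 0 0 = a := by
  simp [PySem.List.pyGetD, PySem.List.pyGet?, PySem.List.pyIdx?]
theorem pvGet1 (a b c : Int) : PySem.List.pyGetD [a, b, c] 1 0 = b := by
  simp [PySem.List.pyGetD, PySem.List.pyGet?, PySem.List.pyIdx?]
theorem pvGet2 (a b c : Int) : PySem.List.pyGetD [a, b, c] 2 0 = c := by
  simp [PySem.List.pyGetD, PySem.List.pyGet?, PySem.List.pyIdx?]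

-- A's loop when no block triggers the break: it accumulates the sum of the grid lookups.
theorem pvLoop_no_break (grid : List (List (List Int))) (l : List (List Int)) (cd : Bool) (sc : Int)
    (h : ∀ b ∈ l, PySem.List.pyGetD b 2 0 - 1 ≠ 0) :
    can_drop_loop grid l cd sc =
      (cd, sc + (l.map (fun b =>
        PySem.List.pyGetD (PySem.List.pyGetD (PySem.List.pyGetD grid (PySem.List.pyGetD b 0 0) [])
          (PySem.List.pyGetD b 1 0) []) (PySem.List.pyGetD b 2 0 - 1) 0)).sum) := by
  induction l generalizing sc with
  | nil => simp [can_drop_loop]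
  | cons b rest ih =>
    simp only [can_drop_loop]
    rw [if_neg (h b (by simp))]
    rw [ih _ (fun b hb => h b (by simp [hb]))]
    simp only [List.map_cons, List.sum_cons]
    ring_nf

theorem pvPairwise_const {α : Type} (l : List α) (key : α → Int) (c : Int)
    (h : ∀ a ∈ l, key a = c) : l.Pairwise (fun u v => key u ≤ key v) := by
  induction l with
  | nil => exact List.Pairwise.nil
  | cons a t ih =>
    refine List.Pairwise.cons (fun b hb => ?_) (ih (fun a ha => h a (by simp [ha])))
    rw [h a (by simp), h b (by simp [hb])]

theorem can_drop_spec : Claim_equal_can_drop := by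
  intro slab grid _ hpre
  unfold Spec_can_drop
  simp only [can_drop, can_drop_alt, get_slab_blocks, Pre_can_drop] at hpre ⊢
  set e1 := PySem.List.pyGetD slab 0 [] with he1
  set e2 := PySem.List.pyGetD slab 1 [] with he2
  set x1 := PySem.List.pyGetD e1 0 0 with hx1
  set y1 := PySem.List.pyGetD e1 1 0 with hy1
  set z1 := PySem.List.pyGetD e1 2 0 with hz1
  set x2 := PySem.List.pyGetD e2 0 0 with hx2
  set y2 := PySem.List.pyGetD e2 1 0 with hy2
  set z2 := PySem.List.pyGetD e2 2 0 with hz2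
  obtain ⟨-, -, -, hmain⟩ := hpre
  by_cases hx : x1 = x2
  · by_cases hy : y1 = y2
    · -- vertical slab: z varies
      rw [if_neg (not_not_intro hx), if_neg (not_not_intro hy)] at hmain ⊢
      rw [if_neg (not_not_intro hx), if_neg (not_not_intro hy)]
      obtain ⟨hle, -⟩ := hmain
      have hcons : PySem.List.pyRange z1 (z2 + 1) 1 = z1 :: PySem.List.pyRange (z1 + 1) (z2 + 1) 1 :=
        PySem.List.pyRange_one_cons (by omega)
      have hsorted : PySem.List.sorted ((PySem.List.pyRange z1 (z2 + 1) 1).map (fun n => [x1, y1, n]))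
          (fun b => PySem.List.pyGetD b 2 0) = (PySem.List.pyRange z1 (z2 + 1) 1).map (fun n => [x1, y1, n]) := by
        refine PySem.List.sorted_eq_self_of_pairwise _ _ ?_
        rw [List.pairwise_map]
        refine (PySem.List.pairwise_lt_pyRange_one z1 (z2+1)).imp ?_
        intro a b hab
        rw [pvGet2, pvGet2]; omega
      rw [hsorted, hcons]
      simp only [List.map_cons, PySem.List.pyGetD_zero_cons, pvGet2]
      have hfilt : ([x1, y1, z1] :: (PySem.List.pyRange (z1 + 1) (z2 + 1) 1).map (fun n => [x1, y1, n])).filter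
          (fun b => PySem.List.pyGetD b 2 0 == z1) = [[x1, y1, z1]] := by
        rw [List.filter_cons_of_pos (by simp [pvGet2])]
        rw [List.filter_map]
        have : (PySem.List.pyRange (z1 + 1) (z2 + 1) 1).filter
            (fun n => PySem.List.pyGetD [x1, y1, n] 2 0 == z1) = [] := by
          rw [List.filter_eq_nil_iff]
          intro n hn
          have := (PySem.List.mem_pyRange_one).mp hn
          simp [pvGet2]; omega
        rw [show (fun b => PySem.List.pyGetD b 2 0 == z1) ∘ (fun n => [x1, y1, n]) =
            (fun n => PySem.List.pyGetD [x1, y1, n] 2 0 == z1) from rfl, this]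
        simp
      rw [hfilt, min_eq_left hle]
      by_cases h1 : z1 = 1
      · simp [can_drop_loop, pvGet2, h1]
      · rw [pvLoop_no_break _ _ _ _ (by intro b hb; simp at hb; subst hb; rw [pvGet2]; omega)]
        simp only [List.map_cons, List.map_nil, pvGet0, pvGet1, pvGet2, List.sum_cons, List.sum_nil]
        rw [if_neg h1]
        split_ifs with hgt <;> simp <;> omega
    · -- horizontal slab along y
      rw [if_neg (not_not_intro hx), if_pos hy] at hmain ⊢
      rw [if_neg (not_not_intro hx), if_pos hy]
      obtain ⟨hle, -⟩ := hmain
      have hall : ∀ b ∈ (PySem.List.pyRange y1 (y2 + 1) 1).map (fun n => [x1, n, z1]),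
          PySem.List.pyGetD b 2 0 = z1 := by
        intro b hb
        obtain ⟨n, -, rfl⟩ := List.mem_map.mp hb
        exact pvGet2 _ _ _
      have hsorted : PySem.List.sorted ((PySem.List.pyRange y1 (y2 + 1) 1).map (fun n => [x1, n, z1]))
          (fun b => PySem.List.pyGetD b 2 0) = (PySem.List.pyRange y1 (y2 + 1) 1).map (fun n => [x1, n, z1]) :=
        PySem.List.sorted_eq_self_of_pairwise _ _
          (pvPairwise_const _ _ z1 hall)
      rw [hsorted]
      have hcons : PySem.List.pyRange y1 (y2 + 1) 1 = y1 :: PySem.List.pyRange (y1 + 1) (y2 + 1) 1 :=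
        PySem.List.pyRange_one_cons (by omega)
      have hminz : PySem.List.pyGetD (PySem.List.pyGetD
          ((PySem.List.pyRange y1 (y2 + 1) 1).map (fun n => [x1, n, z1])) 0 []) 2 0 = z1 := by
        rw [hcons]; simp only [List.map_cons, PySem.List.pyGetD_zero_cons, pvGet2]
      rw [hminz]
      have hfilt : ((PySem.List.pyRange y1 (y2 + 1) 1).map (fun n => [x1, n, z1])).filter
          (fun b => PySem.List.pyGetD b 2 0 == z1) = (PySem.List.pyRange y1 (y2 + 1) 1).map (fun n => [x1, n, z1]) :=
        List.filter_eq_self.mpr (fun b hb => by simp [hall b hb])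
      rw [hfilt]
      by_cases h1 : z1 = 1
      · rw [hcons]
        simp [can_drop_loop, pvGet2, h1]
      · rw [pvLoop_no_break _ _ _ _ (fun b hb => by rw [hall b hb]; omega)]
        simp only [List.map_map]
        rw [if_neg h1]
        simp only [Function.comp_def, pvGet0, pvGet1, pvGet2]
        split_ifs with hgt <;> simp <;> omega
  · -- horizontal slab along x
    rw [if_pos hx] at hmain ⊢
    rw [if_pos hx]
    obtain ⟨hle, -⟩ := hmain
    have hall : ∀ b ∈ (PySem.List.pyRange x1 (x2 + 1) 1).map (fun n => [n, y1, z1]),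
        PySem.List.pyGetD b 2 0 = z1 := by
      intro b hb
      obtain ⟨n, -, rfl⟩ := List.mem_map.mp hb
      exact pvGet2 _ _ _
    have hsorted : PySem.List.sorted ((PySem.List.pyRange x1 (x2 + 1) 1).map (fun n => [n, y1, z1]))
        (fun b => PySem.List.pyGetD b 2 0) = (PySem.List.pyRange x1 (x2 + 1) 1).map (fun n => [n, y1, z1]) :=
      PySem.List.sorted_eq_self_of_pairwise _ _
        (pvPairwise_const _ _ z1 hall)
    rw [hsorted]
    have hcons : PySem.List.pyRange x1 (x2 + 1) 1 = x1 :: PySem.List.pyRange (x1 + 1) (x2 + 1) 1 :=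
      PySem.List.pyRange_one_cons (by omega)
    have hminz : PySem.List.pyGetD (PySem.List.pyGetD
        ((PySem.List.pyRange x1 (x2 + 1) 1).map (fun n => [n, y1, z1])) 0 []) 2 0 = z1 := by
      rw [hcons]; simp only [List.map_cons, PySem.List.pyGetD_zero_cons, pvGet2]
    rw [hminz]
    have hfilt : ((PySem.List.pyRange x1 (x2 + 1) 1).map (fun n => [n, y1, z1])).filter
        (fun b => PySem.List.pyGetD b 2 0 == z1) = (PySem.List.pyRange x1 (x2 + 1) 1).map (fun n => [n, y1, z1]) :=
      List.filter_eq_self.mpr (fun b hb => by simp [hall b hb])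
    rw [hfilt]
    by_cases h1 : z1 = 1
    · rw [hcons]
      simp [can_drop_loop, pvGet2, h1]
    · rw [pvLoop_no_break _ _ _ _ (fun b hb => by rw [hall b hb]; omega)]
      simp only [List.map_map]
      rw [if_neg h1]
      simp only [Function.comp_def, pvGet0, pvGet1, pvGet2]
      split_ifs with hgt <;> simp <;> omega
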